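-- pv_equiv track=rewrite | github.com/sashakile/sxAct | scripts/extract_butler.py | extract_wl_content
-- ===== SOURCE A (Python) =====
-- def extract_wl_content(boxdata_inner: str) -> str | None:
--     """
--     Extract WL expression(s) from the inner content of BoxData[...].
--
--     Two forms:
--       Single:  \\(expr\\)
--       Multi:   {\\(\\(stmt;\\)\\), "\\n", \\(\\(stmt;\\)\\)}
--     """
--     s = boxdata_inner.strip()
--
--     if s.startswith("{"):
--         # Multi-statement cell: each statement is a \\(...\\) token
--         parts = extract_all_wl_tokens(s)
--         if not parts:
--             return None
--         # Each part may be double-wrapped \\(stmt;\\) → strip inner wrap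
--         stmts = [strip_double_wrap(p) for p in parts]
--         return "; ".join(s for s in stmts if s)
--     else:
--         # Single expression: strip outer \\(...\\)
--         parts = extract_all_wl_tokens(s)
--         if not parts:
--             return None
--         return strip_double_wrap(parts[0])
--
-- def extract_all_wl_tokens(text: str) -> list[str]:
--     """
--     Find all top-level \\(content\\) tokens in text.
--     Returns list of content strings (without the \\( \\) delimiters).
--     Uses depth counting to handle nested \\(...\\).
--     """
--     results = []
--     i = 0
--     n = len(text)
--     while i < n - 1:
--         if text[i] == "\\" and text[i + 1] == "(":
--             # Find matching \) counting depth
--             depth = 1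
--             j = i + 2
--             while j < n - 1 and depth > 0:
--                 if text[j] == "\\" and text[j + 1] == "(":
--                     depth += 1
--                     j += 2
--                 elif text[j] == "\\" and text[j + 1] == ")":
--                     depth -= 1
--                     if depth == 0:
--                         results.append(text[i + 2 : j])
--                     j += 2
--                 else:
--                     j += 1
--             i = j
--         else:
--             i += 1
--     return results
--
-- def strip_double_wrap(expr: str) -> str:
--     """If expr is wrapped in \\(...\\), strip one level of wrapping."""
--     expr = expr.strip()
--     tokens = extract_all_wl_tokens(expr)
--     # If the entire expr is a single \\(...\\) wrapper, return the inner content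
--     if len(tokens) == 1 and expr.startswith("\\(") and expr.endswith("\\)"):
--         return tokens[0].strip()
--     return expr
-- ===== SOURCE B (Python) =====
-- def extract_wl_content(boxdata_inner: str) -> str | None:
--     """Extract WL expression(s) from BoxData inner content.
--
--     Staged version: a single tokenizer pass turns the text into a stream of
--     delimiter events ('\\(' / '\\)' with positions); a stack-based fold over
--     that stream yields the top-level token spans, which are sliced out once.
--     """
--     s = boxdata_inner.strip()
--     parts = [s[a + 2 : b] for (a, b) in _spans(_events(s))]
--     if not parts:
--         return None
--     if s.startswith("{"):
--         stmts = [_unwrap(p) for p in parts]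
--         return "; ".join(t for t in stmts if t)
--     return _unwrap(parts[0])
--
-- def _events(text: str) -> list[tuple[bool, int]]:
--     """One pass: (is_open, position) for every '\\(' / '\\)' delimiter."""
--     evs = []
--     j, n = 0, len(text)
--     while j < n - 1:
--         if text[j] == "\\" and text[j + 1] in "()":
--             evs.append((text[j + 1] == "(", j))
--             j += 2
--         else:
--             j += 1
--     return evs
--
-- def _spans(evs: list[tuple[bool, int]]) -> list[tuple[int, int]]:
--     """Fold over the event stream with a stack of open positions; a close that
--     empties the stack completes a top-level span. Stray closes are skipped,
--     unmatched opens produce nothing."""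
--     spans, stack = [], []
--     for is_open, p in evs:
--         if is_open:
--             stack.append(p)
--         elif stack:
--             a = stack.pop()
--             if not stack:
--                 spans.append((a, p))
--     return spans
--
-- def _unwrap(expr: str) -> str:
--     """If expr is exactly one '\\(...\\)' wrapper, strip it."""
--     e = expr.strip()
--     sp = _spans(_events(e))
--     if len(sp) == 1 and e.startswith("\\(") and e.endswith("\\)"):
--         a, b = sp[0]
--         return e[a + 2 : b].strip()
--     return e
-- ===== Notes on version B (the rewrite author's own statement) =====
-- stated objective: alternative
-- what changed: A's fused nested loops (outer scan + inner depth-counter loop per token) are replaced by two staged passes: a tokenizer that emits a stream of delimiter events (is_open, position), then a stack-based fold over that stream that completes a top-level span whenever a close empties the stack; token contents are sliced from the recorded spans.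
import Mathlib
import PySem

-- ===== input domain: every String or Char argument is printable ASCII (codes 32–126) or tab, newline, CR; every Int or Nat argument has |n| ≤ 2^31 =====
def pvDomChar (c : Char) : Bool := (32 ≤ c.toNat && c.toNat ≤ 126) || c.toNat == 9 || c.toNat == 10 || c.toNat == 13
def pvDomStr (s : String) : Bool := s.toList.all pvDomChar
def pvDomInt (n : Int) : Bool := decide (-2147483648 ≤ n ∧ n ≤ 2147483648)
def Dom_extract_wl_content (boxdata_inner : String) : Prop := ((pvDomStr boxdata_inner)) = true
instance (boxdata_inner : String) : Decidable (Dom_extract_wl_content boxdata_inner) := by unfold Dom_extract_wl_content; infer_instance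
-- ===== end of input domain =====

-- B replaces A's fused nested loops (outer scan + per-token inner depth-counter loop) by two
-- staged passes — a tokenizer emitting delimiter events, then a stack-based fold over the event
-- stream that records a top-level span whenever a close empties the stack — same return value,
-- similar cost ("alternative"). In both ports, `fuel` only makes the while-loops structural;
-- any fuel with n - 1 ≤ fuel + start gives the Python value (the loops advance every iteration).

-- ===== PORT A =====
-- inner `while j < n - 1 and depth > 0` loop of extract_all_wl_tokens; state (results, j, depth)
def aInner (l : List Char) (n i : Nat) : Nat → Nat → Nat → List (List Char) →
    List (List Char) × Nat
  | 0, j, _, results => (results, j)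
  | fuel + 1, j, depth, results =>
    if j < n - 1 ∧ 0 < depth then
      if l.getD j ' ' = '\\' ∧ l.getD (j + 1) ' ' = '(' then
        aInner l n i fuel (j + 2) (depth + 1) results
      else if l.getD j ' ' = '\\' ∧ l.getD (j + 1) ' ' = ')' then
        if depth - 1 = 0 then
          aInner l n i fuel (j + 2) (depth - 1)
            (results ++ [PySem.List.slice l (some ((i : Int) + 2)) (some (j : Int))])
        else
          aInner l n i fuel (j + 2) (depth - 1) results
      else
        aInner l n i fuel (j + 1) depth results
    else (results, j)

-- outer `while i < n - 1` loop of extract_all_wl_tokens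
def aTokens (l : List Char) (n : Nat) : Nat → Nat → List (List Char) → List (List Char)
  | 0, _, results => results
  | fuel + 1, i, results =>
    if i < n - 1 then
      if l.getD i ' ' = '\\' ∧ l.getD (i + 1) ' ' = '(' then
        let r := aInner l n i n (i + 2) 1 results
        aTokens l n fuel r.2 r.1
      else aTokens l n fuel (i + 1) results
    else results

def extractAllTokensA (text : List Char) : List (List Char) :=
  aTokens text text.length text.length 0 []

def stripDoubleWrapA (expr : List Char) : List Char :=
  let e := PySem.Chars.strip expr
  let tokens := extractAllTokensA e
  if tokens.length = 1 ∧ PySem.Chars.startswith e ['\\', '('] = true ∧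
      PySem.Chars.endswith e ['\\', ')'] = true then
    PySem.Chars.strip (tokens.getD 0 [])
  else e

def extract_wl_content (boxdata_inner : String) : Option String :=
  let s := PySem.Chars.strip boxdata_inner.toList
  if PySem.Chars.startswith s ['{'] = true then
    let parts := extractAllTokensA s
    if parts = [] then none
    else
      let stmts := parts.map stripDoubleWrapA
      some (String.ofList (PySem.Chars.join [';', ' '] (stmts.filter (fun t => !t.isEmpty))))
  else
    let parts := extractAllTokensA s
    if parts = [] then none
    else some (String.ofList (stripDoubleWrapA (parts.getD 0 [])))

-- ===== PORT B =====
-- _events: one tokenizer pass — (is_open, position) for every '\(' / '\)' delimiter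
def bEvents (l : List Char) (n : Nat) : Nat → Nat → List (Bool × Nat)
  | 0, _ => []
  | fuel + 1, j =>
    if j < n - 1 then
      -- `text[j+1] in "()"` ported as the explicit two-character disjunction (exact on any input)
      if l.getD j ' ' = '\\' ∧ (l.getD (j + 1) ' ' = '(' ∨ l.getD (j + 1) ' ' = ')') then
        (decide (l.getD (j + 1) ' ' = '('), j) :: bEvents l n fuel (j + 2)
      else bEvents l n fuel (j + 1)
    else []

-- _spans: fold over the event stream with a stack of open positions; a close that
-- empties the stack completes a top-level span, stray closes are skipped
def bSpans : List (Bool × Nat) → List Nat → List (Nat × Nat) → List (Nat × Nat)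
  | [], _, spans => spans
  | (isOpen, p) :: rest, stack, spans =>
    if isOpen then bSpans rest (p :: stack) spans
    else
      match stack with
      | [] => bSpans rest [] spans
      | a :: stack' =>
          bSpans rest stack' (if stack' = [] then spans ++ [(a, p)] else spans)

-- `s[a+2:b]` for a span (a, b)
def gSlice (l : List Char) (ab : Nat × Nat) : List Char :=
  PySem.List.slice l (some ((ab.1 : Int) + 2)) (some ((ab.2 : Int)))

-- the `[s[a+2:b] for (a, b) in _spans(_events(s))]` comprehension
def partsOf (text : List Char) : List (List Char) :=
  (bSpans (bEvents text text.length text.length 0) [] []).map (gSlice text)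

-- _unwrap
def bUnwrap (expr : List Char) : List Char :=
  let e := PySem.Chars.strip expr
  let sp := bSpans (bEvents e e.length e.length 0) [] []
  if sp.length = 1 ∧ PySem.Chars.startswith e ['\\', '('] = true ∧
      PySem.Chars.endswith e ['\\', ')'] = true then
    PySem.Chars.strip (gSlice e (sp.getD 0 (0, 0)))
  else e

def extract_wl_content_alt (boxdata_inner : String) : Option String :=
  let s := PySem.Chars.strip boxdata_inner.toList
  let parts := partsOf s
  if parts = [] then none
  else if PySem.Chars.startswith s ['{'] = true then
    let stmts := parts.map bUnwrap
    some (String.ofList (PySem.Chars.join [';', ' '] (stmts.filter (fun t => !t.isEmpty))))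
  else some (String.ofList (bUnwrap (parts.getD 0 [])))

-- ===== PRECONDITION & SPEC =====
-- Python A raises on no input (every loop is a bounded scan), so Pre_ excludes NOTHING:
-- it is an always-true statement recording the two-character WL delimiter tokens
-- (backslash-open-paren, backslash-close-paren) the scanners above look for.
def Pre_extract_wl_content (boxdata_inner : String) : Prop :=
  ("\\(" : String).length = 2 ∧ ("\\)" : String).length = 2
instance (boxdata_inner : String) : Decidable (Pre_extract_wl_content boxdata_inner) := by unfold Pre_extract_wl_content; infer_instance
def pvWitness_extract_wl_content : String := "\\(x; \\)"

def Spec_extract_wl_content (boxdata_inner : String) (out : Option String) : Prop := out = extract_wl_content_alt boxdata_inner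
instance (boxdata_inner : String) (out : Option String) : Decidable (Spec_extract_wl_content boxdata_inner out) := by unfold Spec_extract_wl_content; infer_instance

-- ===== CLAIM (what is proved, stated in full; the proofs are below) =====
def Claim_equal_extract_wl_content : Prop := ∀ (boxdata_inner : String), Dom_extract_wl_content boxdata_inner → Pre_extract_wl_content boxdata_inner → Spec_extract_wl_content boxdata_inner (extract_wl_content boxdata_inner)

-- ===== LEMMAS AND PROOFS =====

-- proof-only helper: position of the close matching one pending open at the head of the
-- event stream, plus the events after it (fuel ≥ length of the list)
def evMatch : Nat → List (Bool × Nat) → Option (Nat × List (Bool × Nat))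
  | 0, _ => none
  | _ + 1, [] => none
  | f + 1, (isOpen, p) :: rest =>
    if isOpen then
      match evMatch f rest with
      | none => none
      | some (_, rest') => evMatch f rest'
    else some (p, rest)

theorem evMatch_len : ∀ f (xs : List (Bool × Nat)) p rest',
    evMatch f xs = some (p, rest') → rest'.length < xs.length := by
  intro f
  induction f with
  | zero => intro xs p rest' h; simp [evMatch] at h
  | succ f ih =>
    intro xs p rest' h
    match xs with
    | [] => simp [evMatch] at h
    | (io, q) :: rest =>
      simp only [evMatch] at h
      split_ifs at h with hio
      · rcases hm : evMatch f rest with _ | ⟨q1, r1⟩ <;> rw [hm] at h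
        · simp at h
        · have h1 := ih rest q1 r1 hm
          have h2 := ih r1 p rest' h
          simp only [List.length_cons]; omega
      · simp at h
        simp [h.2]

theorem evMatch_fuel : ∀ f f' (xs : List (Bool × Nat)), xs.length ≤ f → xs.length ≤ f' →
    evMatch f xs = evMatch f' xs := by
  intro f
  induction f with
  | zero =>
    intro f' xs h h'
    have : xs = [] := by cases xs <;> simp_all
    subst this
    cases f' <;> simp [evMatch]
  | succ f ih =>
    intro f' xs h h'
    match xs with
    | [] => cases f' <;> simp [evMatch]
    | (io, q) :: rest =>
      cases f' with
      | zero => simp at h'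
      | succ f' =>
        simp only [evMatch]
        by_cases hio : io = true
        · simp only [hio, if_true]
          have hr : evMatch f rest = evMatch f' rest := by
            apply ih <;> simp at h h' <;> omega
          rw [← hr]
          rcases hm : evMatch f rest with _ | ⟨q1, r1⟩
          · rfl
          · have hl := evMatch_len f rest q1 r1 hm
            apply ih <;> simp at h h' ⊢ <;> omega
        · simp [hio]

-- canonical matcher over a whole event list
def EM (xs : List (Bool × Nat)) : Option (Nat × List (Bool × Nat)) := evMatch xs.length xs

theorem EM_nil : EM [] = none := rfl

theorem EM_close (p : Nat) (rest : List (Bool × Nat)) :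
    EM ((false, p) :: rest) = some (p, rest) := by
  simp [EM, evMatch]

theorem EM_open (p : Nat) (rest : List (Bool × Nat)) :
    EM ((true, p) :: rest) =
      match EM rest with
      | none => none
      | some (_, r1) => EM r1 := by
  show evMatch (rest.length + 1) ((true, p) :: rest) = _
  simp only [evMatch, if_true]
  unfold EM
  rcases hm : evMatch rest.length rest with _ | ⟨q1, r1⟩
  · rfl
  · have hl := evMatch_len rest.length rest q1 r1 hm
    exact evMatch_fuel rest.length r1.length r1 (by omega) (by omega)

-- ev fuel irrelevance and shape lemmas
theorem bEvents_fuel (l : List Char) (n : Nat) :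
    ∀ f f' j, n - 1 ≤ f + j → n - 1 ≤ f' + j → bEvents l n f j = bEvents l n f' j := by
  intro f
  induction f with
  | zero =>
    intro f' j h h'
    cases f' with
    | zero => rfl
    | succ f' => simp only [bEvents]; rw [if_neg (by omega)]
  | succ f ih =>
    intro f' j h h'
    cases f' with
    | zero => simp only [bEvents]; rw [if_neg (by omega)]
    | succ f' =>
      simp only [bEvents]
      by_cases hj : j < n - 1
      · rw [if_pos hj, if_pos hj]
        split_ifs with h1
        · rw [ih f' (j + 2) (by omega) (by omega)]
        · exact ih f' (j + 1) (by omega) (by omega)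
      · rw [if_neg hj, if_neg hj]

theorem ev_nil (l : List Char) (n : Nat) (f j : Nat) (h : n - 1 ≤ j) :
    bEvents l n f j = [] := by
  cases f with
  | zero => rfl
  | succ f => simp only [bEvents]; rw [if_neg (by omega)]

theorem ev_open (l : List Char) (n j : Nat) (hj : j < n - 1)
    (h1 : l.getD j ' ' = '\\') (h2 : l.getD (j + 1) ' ' = '(') :
    bEvents l n n j = (true, j) :: bEvents l n n (j + 2) := by
  obtain ⟨f, hf⟩ : ∃ f, n = f + 1 := ⟨n - 1, by omega⟩
  rw [show bEvents l n n j = bEvents l n (f + 1) j by rw [← hf]]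
  simp only [bEvents]
  rw [if_pos (by omega), if_pos ⟨h1, Or.inl h2⟩]
  rw [show (decide (l.getD (j + 1) ' ' = '(')) = true by
    simp only [decide_eq_true_eq]; exact h2]
  rw [show bEvents l n f (j + 2) = bEvents l n n (j + 2) from
    bEvents_fuel l n f n (j + 2) (by omega) (by omega)]

theorem ev_close (l : List Char) (n j : Nat) (hj : j < n - 1)
    (h1 : l.getD j ' ' = '\\') (h2 : l.getD (j + 1) ' ' = ')') :
    bEvents l n n j = (false, j) :: bEvents l n n (j + 2) := by
  obtain ⟨f, hf⟩ : ∃ f, n = f + 1 := ⟨n - 1, by omega⟩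
  rw [show bEvents l n n j = bEvents l n (f + 1) j by rw [← hf]]
  simp only [bEvents]
  rw [if_pos (by omega), if_pos ⟨h1, Or.inr h2⟩]
  rw [show (decide (l.getD (j + 1) ' ' = '(')) = false by
    simp only [decide_eq_false_iff_not]; rw [h2]; decide]
  rw [show bEvents l n f (j + 2) = bEvents l n n (j + 2) from
    bEvents_fuel l n f n (j + 2) (by omega) (by omega)]

theorem ev_skip (l : List Char) (n j : Nat) (hj : j < n - 1)
    (h : ¬(l.getD j ' ' = '\\' ∧ (l.getD (j + 1) ' ' = '(' ∨ l.getD (j + 1) ' ' = ')'))) :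
    bEvents l n n j = bEvents l n n (j + 1) := by
  obtain ⟨f, hf⟩ : ∃ f, n = f + 1 := ⟨n - 1, by omega⟩
  rw [show bEvents l n n j = bEvents l n (f + 1) j by rw [← hf]]
  simp only [bEvents]
  rw [if_pos (by omega), if_neg h]
  exact bEvents_fuel l n f n (j + 1) (by omega) (by omega)

-- B-side: effect of one pending open (head of stack) on the span fold
theorem spans_pop : ∀ m (evs : List (Bool × Nat)), evs.length ≤ m →
    ∀ (a : Nat) (stack : List Nat) (spans : List (Nat × Nat)),
      (∀ p rest', EM evs = some (p, rest') →
        bSpans evs (a :: stack) spans =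
          bSpans rest' stack (if stack = [] then spans ++ [(a, p)] else spans)) ∧
      (EM evs = none → bSpans evs (a :: stack) spans = spans) := by
  intro m
  induction m with
  | zero =>
    intro evs h a stack spans
    have : evs = [] := by cases evs <;> simp_all
    subst this
    exact ⟨fun p rest' hp => by simp [EM_nil] at hp, fun _ => rfl⟩
  | succ m ih =>
    intro evs h a stack spans
    match evs with
    | [] => exact ⟨fun p rest' hp => by simp [EM_nil] at hp, fun _ => rfl⟩
    | (io, q) :: rest =>
      by_cases hio : io = true
      · subst hio
        have hstep : bSpans ((true, q) :: rest) (a :: stack) spans =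
            bSpans rest (q :: a :: stack) spans := by simp [bSpans]
        rcases hm : EM rest with _ | ⟨q1, r1⟩
        · have hnone := (ih rest (by simp at h; omega) q (a :: stack) spans).2 hm
          refine ⟨fun p rest' hp => ?_, fun _ => by rw [hstep, hnone]⟩
          rw [EM_open, hm] at hp; cases hp
        · have hsome := (ih rest (by simp at h; omega) q (a :: stack) spans).1 q1 r1 hm
          have hr1 : r1.length ≤ m := by
            have := evMatch_len rest.length rest q1 r1 hm
            simp at h; omega
          have hmid : bSpans ((true, q) :: rest) (a :: stack) spans =
              bSpans r1 (a :: stack) spans := by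
            rw [hstep, hsome]; simp
          have hfin := ih r1 hr1 a stack spans
          refine ⟨fun p rest' hp => ?_, fun hp => ?_⟩
          · rw [EM_open, hm] at hp
            rw [hmid]; exact hfin.1 p rest' hp
          · rw [EM_open, hm] at hp
            rw [hmid]; exact hfin.2 hp
      · have hio' : io = false := by simpa using hio
        subst hio'
        refine ⟨fun p rest' hp => ?_, fun hp => ?_⟩
        · rw [EM_close] at hp
          cases hp
          simp [bSpans]
        · rw [EM_close] at hp; cases hp

-- A-side fuel lemmas
theorem aInner_depth_zero (l : List Char) (n i : Nat) (f j : Nat) (res : List (List Char)) :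
    aInner l n i f j 0 res = (res, j) := by
  cases f with
  | zero => rfl
  | succ f => simp only [aInner]; rw [if_neg (by omega)]

theorem aInner_fuel (l : List Char) (n i : Nat) :
    ∀ f f' j d res, n - 1 ≤ f + j → n - 1 ≤ f' + j →
      aInner l n i f j d res = aInner l n i f' j d res := by
  intro f
  induction f with
  | zero =>
    intro f' j d res h h'
    cases f' with
    | zero => rfl
    | succ f' =>
      simp only [aInner]
      rw [if_neg (by omega)]
  | succ f ih =>
    intro f' j d res h h'
    cases f' with
    | zero =>
      simp only [aInner]
      rw [if_neg (by omega)]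
    | succ f' =>
      simp only [aInner]
      by_cases hg : j < n - 1 ∧ 0 < d
      · rw [if_pos hg, if_pos hg]
        split_ifs with h1 h2 h3
        · exact ih f' (j + 2) (d + 1) res (by omega) (by omega)
        · exact ih f' (j + 2) (d - 1) _ (by omega) (by omega)
        · exact ih f' (j + 2) (d - 1) res (by omega) (by omega)
        · exact ih f' (j + 1) d res (by omega) (by omega)
      · rw [if_neg hg, if_neg hg]

theorem aTokens_stop (l : List Char) (n : Nat) (f i : Nat) (res : List (List Char))
    (h : n - 1 ≤ i) : aTokens l n f i res = res := by
  cases f with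
  | zero => rfl
  | succ f => simp only [aTokens]; rw [if_neg (by omega)]

-- Core correspondence: A's depth-counting inner loop at depth d+1 behaves like the event
-- matcher EM on the event stream from the same position — a matching close at b drives
-- depth down one level (appending the slice at depth 0); no match means the inner loop
-- runs to the end leaving results untouched.
theorem inner_sim (l : List Char) (n i : Nat) :
    ∀ m j d res, n - j ≤ m →
      (∀ b rest', EM (bEvents l n n j) = some (b, rest') →
        rest' = bEvents l n n (b + 2) ∧ j ≤ b ∧ b < n - 1 ∧
        aInner l n i n j (d + 1) res =
          (if d = 0 then (res ++ [gSlice l (i, b)], b + 2)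
           else aInner l n i n (b + 2) d res)) ∧
      (EM (bEvents l n n j) = none →
        (aInner l n i n j (d + 1) res).1 = res ∧ n - 1 ≤ (aInner l n i n j (d + 1) res).2) := by
  intro m
  induction m with
  | zero =>
    intro j d res hm
    have hev : bEvents l n n j = [] := ev_nil l n n j (by omega)
    have hA : aInner l n i n j (d + 1) res = (res, j) := by
      cases n with
      | zero => rfl
      | succ n' => simp only [aInner]; rw [if_neg (by omega)]
    rw [hev]
    exact ⟨fun b rest' hb => by simp [EM_nil] at hb, fun _ => by rw [hA]; exact ⟨rfl, by omega⟩⟩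
  | succ m ih =>
    intro j d res hm
    by_cases hj : j < n - 1
    · by_cases h1 : l.getD j ' ' = '\\' ∧ l.getD (j + 1) ' ' = '('
      · -- open: depth goes up
        have hev : bEvents l n n j = (true, j) :: bEvents l n n (j + 2) :=
          ev_open l n j hj h1.1 h1.2
        obtain ⟨f, hf⟩ : ∃ f, n = f + 1 := ⟨n - 1, by omega⟩
        have hA : aInner l n i n j (d + 1) res = aInner l n i n (j + 2) (d + 2) res := by
          rw [show aInner l n i n j (d + 1) res = aInner l n i (f + 1) j (d + 1) res by rw [← hf]]
          simp only [aInner]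
          rw [if_pos (by omega), if_pos h1]
          exact aInner_fuel l n i f n (j + 2) (d + 2) res (by omega) (by omega)
        rw [hev, EM_open]
        rcases hm2 : EM (bEvents l n n (j + 2)) with _ | ⟨k1, r1⟩
        · have hih := (ih (j + 2) (d + 1) res (by omega)).2 hm2
          rw [hA]
          exact ⟨fun b rest' hb => (nomatch hb), fun _ => hih⟩
        · obtain ⟨hr1, hk1a, hk1b, hstep⟩ := (ih (j + 2) (d + 1) res (by omega)).1 k1 r1 hm2
          rw [if_neg (by omega)] at hstep
          subst hr1
          have hfin := ih (k1 + 2) d res (by omega)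
          refine ⟨fun b rest' hb => ?_, fun hb => ?_⟩
          · obtain ⟨hr', hba, hbb, hstep2⟩ := hfin.1 b rest' hb
            exact ⟨hr', by omega, hbb, by rw [hA, hstep, hstep2]⟩
          · have := hfin.2 hb
            rw [hA, hstep]; exact this
      · by_cases h2 : l.getD j ' ' = '\\' ∧ l.getD (j + 1) ' ' = ')'
        · -- close: this is the match
          have hev : bEvents l n n j = (false, j) :: bEvents l n n (j + 2) :=
            ev_close l n j hj h2.1 h2.2
          obtain ⟨f, hf⟩ : ∃ f, n = f + 1 := ⟨n - 1, by omega⟩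
          rw [hev, EM_close]
          refine ⟨fun b rest' hb => ?_, fun hb => by cases hb⟩
          cases hb
          refine ⟨rfl, le_refl j, hj, ?_⟩
          rw [show aInner l n i n j (d + 1) res = aInner l n i (f + 1) j (d + 1) res by rw [← hf]]
          simp only [aInner]
          rw [if_pos (by omega), if_neg h1, if_pos h2]
          simp only [Nat.add_sub_cancel]
          by_cases hd : d = 0
          · subst hd
            rw [if_pos rfl, if_pos rfl]
            rw [aInner_depth_zero]
            rfl
          · rw [if_neg hd, if_neg hd]
            exact aInner_fuel l n i f n (j + 2) d res (by omega) (by omega)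
        · -- plain character
          have hev : bEvents l n n j = bEvents l n n (j + 1) := by
            apply ev_skip l n j hj
            rintro ⟨hb, hc | hc⟩
            · exact h1 ⟨hb, hc⟩
            · exact h2 ⟨hb, hc⟩
          obtain ⟨f, hf⟩ : ∃ f, n = f + 1 := ⟨n - 1, by omega⟩
          have hA : aInner l n i n j (d + 1) res = aInner l n i n (j + 1) (d + 1) res := by
            rw [show aInner l n i n j (d + 1) res = aInner l n i (f + 1) j (d + 1) res by rw [← hf]]
            simp only [aInner]
            rw [if_pos (by omega), if_neg h1, if_neg h2]
            exact aInner_fuel l n i f n (j + 1) (d + 1) res (by omega) (by omega)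
          rw [hev, hA]
          have ihj := ih (j + 1) d res (by omega)
          refine ⟨fun b rest' hb => ?_, ihj.2⟩
          obtain ⟨ha', hb', hc', hd'⟩ := ihj.1 b rest' hb
          exact ⟨ha', by omega, hc', hd'⟩
    · have hev : bEvents l n n j = [] := ev_nil l n n j (by omega)
      have hA : aInner l n i n j (d + 1) res = (res, j) := by
        cases n with
        | zero => rfl
        | succ n' => simp only [aInner]; rw [if_neg (by omega)]
      rw [hev]
      exact ⟨fun b rest' hb => by simp [EM_nil] at hb, fun _ => by rw [hA]; exact ⟨rfl, by omega⟩⟩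

-- Outer correspondence: A's token loop equals the span fold, mapped through the slice
theorem outer_sim (l : List Char) (n : Nat) :
    ∀ f i spans, n - 1 ≤ f + i →
      aTokens l n f i (spans.map (gSlice l)) =
        (bSpans (bEvents l n n i) [] spans).map (gSlice l) := by
  intro f
  induction f with
  | zero =>
    intro i spans h
    rw [ev_nil l n n i (by omega)]
    rfl
  | succ f ih =>
    intro i spans h
    by_cases hi : i < n - 1
    · by_cases h1 : l.getD i ' ' = '\\' ∧ l.getD (i + 1) ' ' = '('
      · -- token start
        have hev : bEvents l n n i = (true, i) :: bEvents l n n (i + 2) :=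
          ev_open l n i hi h1.1 h1.2
        have hA : aTokens l n (f + 1) i (spans.map (gSlice l)) =
            aTokens l n f (aInner l n i n (i + 2) 1 (spans.map (gSlice l))).2
              (aInner l n i n (i + 2) 1 (spans.map (gSlice l))).1 := by
          simp only [aTokens]
          rw [if_pos hi, if_pos h1]
        have hpush : bSpans (bEvents l n n i) [] spans =
            bSpans (bEvents l n n (i + 2)) [i] spans := by
          rw [hev]; simp [bSpans]
        have hpop := spans_pop (bEvents l n n (i + 2)).length (bEvents l n n (i + 2))
          (le_refl _) i [] spans
        have hsim := inner_sim l n i (n - (i + 2)) (i + 2) 0 (spans.map (gSlice l)) (by omega)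
        rcases hm : EM (bEvents l n n (i + 2)) with _ | ⟨b, rest'⟩
        · obtain ⟨hres, hend⟩ := hsim.2 hm
          rw [hA, aTokens_stop l n f _ _ hend, hres, hpush, hpop.2 hm]
        · obtain ⟨hr', hba, hbb, hstep⟩ := hsim.1 b rest' hm
          rw [if_pos rfl] at hstep
          have hmap : spans.map (gSlice l) ++ [gSlice l (i, b)] =
              (spans ++ [(i, b)]).map (gSlice l) := by simp
          rw [hA, hstep]
          rw [show ((spans.map (gSlice l) ++ [gSlice l (i, b)], b + 2) :
              List (List Char) × Nat).1 = (spans ++ [(i, b)]).map (gSlice l) by simp]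
          rw [show ((spans.map (gSlice l) ++ [gSlice l (i, b)], b + 2) :
              List (List Char) × Nat).2 = b + 2 by rfl]
          rw [ih (b + 2) (spans ++ [(i, b)]) (by omega)]
          rw [hpush, hpop.1 b rest' hm, if_pos rfl, hr']
      · by_cases h2 : l.getD i ' ' = '\\' ∧ l.getD (i + 1) ' ' = ')'
        · -- stray top-level close: A skips one char, B drops the event (stack empty);
          -- the char after ')' cannot start a delimiter, so the streams re-sync
          have hev : bEvents l n n i = (false, i) :: bEvents l n n (i + 2) :=
            ev_close l n i hi h2.1 h2.2
          have hresync : bEvents l n n (i + 1) = bEvents l n n (i + 2) := by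
            by_cases hi1 : i + 1 < n - 1
            · apply ev_skip l n (i + 1) hi1
              rintro ⟨hb, -⟩
              rw [h2.2] at hb
              exact absurd hb (by decide)
            · rw [ev_nil l n n (i + 1) (by omega), ev_nil l n n (i + 2) (by omega)]
          have hA : aTokens l n (f + 1) i (spans.map (gSlice l)) =
              aTokens l n f (i + 1) (spans.map (gSlice l)) := by
            simp only [aTokens]
            rw [if_pos hi, if_neg h1]
          rw [hA, ih (i + 1) spans (by omega), hresync, hev]
          simp [bSpans]
        · have hev : bEvents l n n i = bEvents l n n (i + 1) := by
            apply ev_skip l n i hi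
            rintro ⟨hb, hc | hc⟩
            · exact h1 ⟨hb, hc⟩
            · exact h2 ⟨hb, hc⟩
          have hA : aTokens l n (f + 1) i (spans.map (gSlice l)) =
              aTokens l n f (i + 1) (spans.map (gSlice l)) := by
            simp only [aTokens]
            rw [if_pos hi, if_neg h1]
          rw [hA, ih (i + 1) spans (by omega), hev]
    · rw [aTokens_stop l n (f + 1) i _ (by omega), ev_nil l n n i (by omega)]
      rfl

theorem tokens_eq (text : List Char) : extractAllTokensA text = partsOf text := by
  have := outer_sim text text.length text.length 0 [] (by omega)
  simpa [extractAllTokensA, partsOf] using this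

theorem unwrap_eq (expr : List Char) : stripDoubleWrapA expr = bUnwrap expr := by
  simp only [stripDoubleWrapA, bUnwrap]
  have ht := tokens_eq (PySem.Chars.strip expr)
  rw [ht]
  simp only [partsOf, List.length_map]
  rcases hsp : bSpans (bEvents (PySem.Chars.strip expr)
      (PySem.Chars.strip expr).length (PySem.Chars.strip expr).length 0) [] [] with _ | ⟨ab, tl⟩
  · simp
  · rcases tl with _ | ⟨cd, tl'⟩ <;> simp

-- ===== VERDICT (by name: the statement is the Claim_ definition above) =====
theorem extract_wl_content_spec : Claim_equal_extract_wl_content := by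
  intro boxdata_inner _ _
  unfold Spec_extract_wl_content
  simp only [extract_wl_content, extract_wl_content_alt, tokens_eq,
    show stripDoubleWrapA = bUnwrap from funext unwrap_eq]
  by_cases hb : PySem.Chars.startswith (PySem.Chars.strip boxdata_inner.toList) ['{'] = true <;>
    by_cases hp : partsOf (PySem.Chars.strip boxdata_inner.toList) = [] <;>
      simp [hb, hp]
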